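-- pv_equiv track=rewrite | github.com/snowman74/Intro_python | lesson4/lesson4.py | rare_letter
-- ===== SOURCE A (Python) =====
-- def rare_letter(list_words):
--     '''
--     :param list: список слов
--     :return:    самая редкая буква с которой начинаются эти слова
--     '''
--     letters_list = []
--     dictionary = {}
--
--     for i in list_words:
--         letters_list.append(i[:1])
--
--     letters_list = sorted(letters_list)
--     # кусок из предыдущего урока (чего коду пропадать)
--     for i in letters_list:
--         dictionary[i] = 1
--
--     for i in range(len(letters_list) - 1):
--         if letters_list[i] == letters_list[i + 1]:
--             dictionary[letters_list[i]] += 1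
--
--     letters_list = sorted(list(dictionary.items()), key=lambda i: i[1])
--
--     return letters_list[0][0]
-- ===== SOURCE B (Python) =====
-- def rare_letter(list_words):
--     counts = {}
--     for w in list_words:
--         k = w[:1]
--         counts[k] = counts.get(k, 0) + 1
--     return min(counts.items(), key=lambda kv: (kv[1], kv[0]))[0]
-- ===== Notes on version B (the rewrite author's own statement) =====
-- stated objective: faster
-- what changed: B replaces A's sort-the-whole-list, reinsert-into-a-dict and adjacent-equal-pair counting by a single counting pass over the words and one min over the distinct (letter, count) pairs with key (count, letter).
-- outside the precondition, e.g. on rare_letter([]): A raises IndexError, B raises ValueError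
import Mathlib
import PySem

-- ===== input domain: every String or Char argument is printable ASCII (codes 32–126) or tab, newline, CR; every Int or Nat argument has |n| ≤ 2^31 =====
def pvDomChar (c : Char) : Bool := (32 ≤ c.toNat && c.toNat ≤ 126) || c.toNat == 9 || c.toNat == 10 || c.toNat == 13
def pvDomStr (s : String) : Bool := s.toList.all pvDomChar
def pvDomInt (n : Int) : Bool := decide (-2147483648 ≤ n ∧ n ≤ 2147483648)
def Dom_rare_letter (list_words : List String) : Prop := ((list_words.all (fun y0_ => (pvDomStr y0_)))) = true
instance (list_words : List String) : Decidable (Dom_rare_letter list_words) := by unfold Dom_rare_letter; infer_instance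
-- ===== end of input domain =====

-- B replaces A's sort-the-whole-list + adjacent-pair counting by a single counting pass and one
-- min over the distinct (letter, count) pairs; equivalence is about the return value (neither mutates).

-- w[:1] on a string: exact via PySem.Chars.slice on the character list
def pvFirst (w : String) : String := String.ofList (PySem.Chars.slice w.toList none (some 1))

-- ===== PORT A =====
def rare_letter (list_words : List String) : String :=
  let letters0 := list_words.map (fun i => pvFirst i)
  let L := PySem.List.sorted letters0 (fun s => s) false
  let d1 := L.foldl (fun d i => d.insert i (1 : Int)) PySem.Dict.empty
  let d2 := (PySem.List.pyRange 0 ((L.length : Int) - 1) 1).foldl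
      (fun d i =>
        if PySem.List.pyGetD L i "" == PySem.List.pyGetD L (i + 1) "" then
          d.modify (PySem.List.pyGetD L i "") 0 (· + 1)
        else d) d1
  let itemsS := PySem.List.sorted d2.items (fun p => p.2) false
  match PySem.List.pyGet? itemsS 0 with
  | some p => p.1
  | none => ""   -- Python raises IndexError here (empty input, excluded by Pre_)

-- ===== PORT B =====
def rare_letter_alt (list_words : List String) : String :=
  let counts := list_words.foldl
      (fun d w => d.insert (pvFirst w) (d.getD (pvFirst w) 0 + (1 : Int))) PySem.Dict.empty
  match PySem.List.min2? counts.items (fun kv => kv.2) (fun kv => kv.1) with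
  | some kv => kv.1
  | none => ""   -- Python raises ValueError here (empty input, excluded by Pre_)

-- ===== PRECONDITION & SPEC =====
-- Pre_ excludes only the empty list, on which A raises IndexError (and B raises ValueError).
def Pre_rare_letter (list_words : List String) : Prop := list_words ≠ []
instance (list_words : List String) : Decidable (Pre_rare_letter list_words) := by
  unfold Pre_rare_letter; infer_instance
def pvWitness_rare_letter : List String := ["ab", "cd", "c"]

def Spec_rare_letter (list_words : List String) (out : String) : Prop := out = rare_letter_alt list_words
instance (list_words : List String) (out : String) : Decidable (Spec_rare_letter list_words out) := by unfold Spec_rare_letter; infer_instance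

-- ===== CLAIM (what is proved, stated in full; the proofs are below) =====
def Claim_equal_rare_letter : Prop := ∀ (list_words : List String), Dom_rare_letter list_words → Pre_rare_letter list_words → Spec_rare_letter list_words (rare_letter list_words)

-- ===== LEMMAS AND PROOFS =====

-- step functions: how the head of an insertion sort, resp. Python's min(..., key=(k1,k2)), evolve
def pvStepA {α : Type} (k1 : α → Int) (acc : Option α) (x : α) : Option α :=
  match acc with
  | none => some x
  | some m => if k1 x < k1 m then some x else some m

def pvStepB {α : Type} (k1 : α → Int) (k2 : α → String) (acc : Option α) (x : α) : Option α :=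
  match acc with
  | none => some x
  | some m => if (decide (k1 x < k1 m) || !decide (k1 m < k1 x) && decide (k2 x < k2 m)) = true
              then some x else some m

theorem head?_insertBy {α : Type} (before : α → α → Bool) (x : α) (l : List α) :
    (PySem.List.insertBy before x l).head? =
      match l.head? with
      | none => some x
      | some y => if before x y then some x else some y := by
  cases l with
  | nil => simp [PySem.List.insertBy]
  | cons y ys => by_cases h : before x y = true <;> simp [PySem.List.insertBy, h]

theorem head?_foldl_insertBy {α : Type} (before : α → α → Bool) (xs : List α) (l : List α) :
    (xs.foldl (fun acc x => PySem.List.insertBy before x acc) l).head? =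
      xs.foldl (fun acc x =>
        match acc with
        | none => some x
        | some y => if before x y then some x else some y) l.head? := by
  induction xs generalizing l with
  | nil => rfl
  | cons x t ih =>
      simp only [List.foldl_cons]
      rw [ih, head?_insertBy]

theorem head?_sorted_eq_foldl_stepA {α : Type} (k1 : α → Int) (xs : List α) :
    (PySem.List.sorted xs k1 false).head? = xs.foldl (pvStepA k1) none := by
  rw [PySem.List.sorted_eq_foldl_insertBy, head?_foldl_insertBy]
  simp only [List.head?_nil]
  congr 1
  funext acc x
  cases acc <;> simp [pvStepA]

theorem min2?_eq_foldl_stepB {α : Type} (k1 : α → Int) (k2 : α → String) (xs : List α) :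
    PySem.List.min2? xs k1 k2 = xs.foldl (pvStepB k1 k2) none := rfl

-- on a list strictly increasing in k2, the two folds agree
theorem foldl_stepA_eq_stepB {α : Type} (k1 : α → Int) (k2 : α → String) :
    ∀ (xs : List α) (acc : Option α),
      xs.Pairwise (fun a b => k2 a < k2 b) →
      (∀ m, acc = some m → ∀ y ∈ xs, k2 m < k2 y) →
      xs.foldl (pvStepA k1) acc = xs.foldl (pvStepB k1 k2) acc := by
  intro xs
  induction xs with
  | nil => intro acc _ _; rfl
  | cons x t ih =>
      intro acc hpw hinv
      have hpt : t.Pairwise (fun a b => k2 a < k2 b) := (List.pairwise_cons.mp hpw).2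
      have hxt : ∀ y ∈ t, k2 x < k2 y := (List.pairwise_cons.mp hpw).1
      simp only [List.foldl_cons]
      cases acc with
      | none =>
          have : pvStepA k1 none x = pvStepB k1 k2 none x := rfl
          rw [this]
          exact ih (some x) hpt (by intro m hm y hy; cases hm; exact hxt y hy)
      | some m =>
          have hmx : k2 m < k2 x := hinv m rfl x (List.mem_cons_self)
          have hstep : pvStepA k1 (some m) x = pvStepB k1 k2 (some m) x := by
            simp only [pvStepA, pvStepB]
            by_cases h1 : k1 x < k1 m
            · simp [h1]
            · have h2 : ¬ k2 x < k2 m := not_lt.mpr (le_of_lt hmx)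
              by_cases h3 : k1 m < k1 x <;> simp [h1, h2, h3]
          rw [hstep]
          have hnext : ∀ m', pvStepB k1 k2 (some m) x = some m' → ∀ y ∈ t, k2 m' < k2 y := by
            intro m' hm' y hy
            simp only [pvStepB] at hm'
            split at hm'
            · cases hm'; exact hxt y hy
            · cases hm'; exact lt_trans hmx (hxt y hy)
          exact ih _ hpt hnext

-- the lexicographic order min(..., key=lambda kv: (kv[1], kv[0])) minimises
def pvLexLE {α : Type} (k1 : α → Int) (k2 : α → String) (a b : α) : Prop :=
  k1 a < k1 b ∨ (k1 a = k1 b ∧ k2 a ≤ k2 b)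

theorem pvLexLE_refl {α : Type} (k1 : α → Int) (k2 : α → String) (a : α) : pvLexLE k1 k2 a a :=
  Or.inr ⟨rfl, le_refl _⟩

theorem pvLexLE_trans {α : Type} (k1 : α → Int) (k2 : α → String) {a b c : α}
    (h1 : pvLexLE k1 k2 a b) (h2 : pvLexLE k1 k2 b c) : pvLexLE k1 k2 a c := by
  rcases h1 with h1 | ⟨h1e, h1s⟩ <;> rcases h2 with h2 | ⟨h2e, h2s⟩
  · exact Or.inl (lt_trans h1 h2)
  · exact Or.inl (h2e ▸ h1)
  · exact Or.inl (h1e ▸ h2)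
  · exact Or.inr ⟨h1e.trans h2e, le_trans h1s h2s⟩

theorem stepB_some {α : Type} (k1 : α → Int) (k2 : α → String) {m0 x a : α}
    (h : pvStepB k1 k2 (some m0) x = some a) :
    (a = x ∧ pvLexLE k1 k2 a m0) ∨ (a = m0 ∧ pvLexLE k1 k2 a x) := by
  simp only [pvStepB] at h
  split at h
  · rename_i hc
    cases h
    simp only [Bool.or_eq_true, Bool.and_eq_true, Bool.not_eq_true', decide_eq_true_eq,
      decide_eq_false_iff_not] at hc
    left
    refine ⟨rfl, ?_⟩
    rcases hc with hc | ⟨hc1, hc2⟩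
    · exact Or.inl hc
    · rcases lt_or_eq_of_le (not_lt.mp hc1) with h' | h'
      · exact Or.inl h'
      · exact Or.inr ⟨h', le_of_lt hc2⟩
  · rename_i hc
    cases h
    right
    refine ⟨rfl, ?_⟩
    have hA : ¬ k1 m0 < k1 x → ¬ k1 x < k1 m0 := fun _ hh => hc (by simp [hh])
    have hB : ¬ k1 m0 < k1 x → ¬ k2 x < k2 m0 := fun h1 h2 => hc (by simp [h1, h2])
    rcases lt_trichotomy (k1 m0) (k1 x) with h' | h' | h'
    · exact Or.inl h'
    · have hnl : ¬ k1 m0 < k1 x := not_lt.mpr (le_of_eq h'.symm)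
      exact Or.inr ⟨h', not_lt.mp (hB hnl)⟩
    · exact absurd h' (hA (not_lt.mpr (le_of_lt h')))

theorem foldl_stepB_inv {α : Type} (k1 : α → Int) (k2 : α → String) :
    ∀ (xs : List α) (acc : Option α) (m : α), xs.foldl (pvStepB k1 k2) acc = some m →
      (acc = some m ∨ m ∈ xs) ∧ (∀ a, acc = some a → pvLexLE k1 k2 m a) ∧
      (∀ y ∈ xs, pvLexLE k1 k2 m y) := by
  intro xs
  induction xs with
  | nil =>
      intro acc m h
      simp only [List.foldl_nil] at h
      refine ⟨Or.inl h, ?_, by simp⟩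
      intro a ha; rw [ha] at h; cases h; exact pvLexLE_refl k1 k2 _
  | cons x t ih =>
      intro acc m h
      simp only [List.foldl_cons] at h
      obtain ⟨hmem, hacc, hall⟩ := ih (pvStepB k1 k2 acc x) m h
      obtain ⟨b, hstep⟩ : ∃ b, pvStepB k1 k2 acc x = some b := by
        cases acc with
        | none => exact ⟨x, rfl⟩
        | some m0 => simp only [pvStepB]; split <;> exact ⟨_, rfl⟩
      have hmb : pvLexLE k1 k2 m b := hacc b hstep
      have hsx : (b = x ∧ ∀ a, acc = some a → pvLexLE k1 k2 b a) ∨ (acc = some b ∧ pvLexLE k1 k2 b x) := by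
        cases acc with
        | none =>
            left
            simp only [pvStepB] at hstep
            cases hstep
            exact ⟨rfl, by intro a ha; cases ha⟩
        | some m0 =>
            rcases stepB_some k1 k2 hstep with ⟨hbx, hle⟩ | ⟨hbm, hle⟩
            · left; exact ⟨hbx, by intro a ha; cases ha; exact hle⟩
            · right; exact ⟨by rw [hbm], hle⟩
      have hmx : pvLexLE k1 k2 m x := by
        rcases hsx with ⟨hbx, _⟩ | ⟨_, hbx⟩
        · exact hbx ▸ hmb
        · exact pvLexLE_trans k1 k2 hmb hbx
      refine ⟨?_, ?_, ?_⟩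
      · rcases hmem with hm | hm
        · rw [hstep] at hm; cases hm
          rcases hsx with ⟨hbx, _⟩ | ⟨hab, _⟩
          · exact Or.inr (hbx ▸ List.mem_cons_self)
          · exact Or.inl hab
        · exact Or.inr (List.mem_cons_of_mem _ hm)
      · intro a ha
        rcases hsx with ⟨_, hba⟩ | ⟨hab, _⟩
        · exact pvLexLE_trans k1 k2 hmb (hba a ha)
        · rw [ha] at hab; cases hab; exact hmb
      · intro y hy
        rcases List.mem_cons.mp hy with hyx | hyt
        · exact hyx ▸ hmx
        · exact hall y hyt

-- min2? returns a lexicographic minimum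
theorem min2?_isMin {α : Type} (k1 : α → Int) (k2 : α → String)
    (xs : List α) (m : α) (h : PySem.List.min2? xs k1 k2 = some m) :
    m ∈ xs ∧ ∀ y ∈ xs, pvLexLE k1 k2 m y := by
  rw [min2?_eq_foldl_stepB] at h
  obtain ⟨hmem, _, hall⟩ := foldl_stepB_inv k1 k2 xs none m h
  rcases hmem with hm | hm
  · cases hm
  · exact ⟨hm, hall⟩

-- ---- A-side characterisation ----

-- the letters counted by A's adjacent-pair loop: first components of equal adjacent pairs
def pvAdj (L : List String) : List String :=
  ((L.zip L.tail).filter (fun p => p.1 == p.2)).map (fun p => p.1)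

theorem foldl_if_filter {α β : Type} (p : α → Bool) (g : β → α → β) :
    ∀ (l : List α) (init : β),
      l.foldl (fun acc x => if p x then g acc x else acc) init = (l.filter p).foldl g init := by
  intro l
  induction l with
  | nil => intro init; rfl
  | cons x t ih =>
      intro init
      by_cases h : p x = true <;> simp [h, ih]

theorem getD_foldl_insert_one :
    ∀ (L : List String) (d : PySem.Dict String Int) (k : String),
      (L.foldl (fun d i => d.insert i (1 : Int)) d).getD k 0 =
        if k ∈ L then 1 else d.getD k 0 := by
  intro L
  induction L with
  | nil => intro d k; simp
  | cons x t ih =>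
      intro d k
      simp only [List.foldl_cons, ih, PySem.Dict.getD_insert]
      by_cases hkt : k ∈ t <;> by_cases hkx : k = x <;> simp [hkt, hkx]

theorem update_of_subset :
    ∀ (xs : List String) (s : PySem.Set String), (∀ x ∈ xs, x ∈ s) → PySem.Set.update s xs = s := by
  intro xs
  induction xs with
  | nil => intro s _; rfl
  | cons x t ih =>
      intro s hsub
      have hx : s.add x = s := PySem.Set.add_of_mem (hsub x List.mem_cons_self)
      simp only [PySem.Set.update, List.foldl_cons] at *
      rw [hx]
      exact ih s (fun y hy => hsub y (List.mem_cons_of_mem _ hy))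

-- on a sorted list, each element occurs once more than it appears as an equal adjacent pair
theorem count_pvAdj (L : List String) (hL : L.Pairwise (· ≤ ·)) :
    ∀ k ∈ L, L.count k = (pvAdj L).count k + 1 := by
  induction L with
  | nil => intro k hk; cases hk
  | cons x t ih =>
      intro k hk
      cases t with
      | nil =>
          rcases List.mem_singleton.mp hk with rfl
          simp [pvAdj]
      | cons y t' =>
          have hxy : x ≤ y := (List.pairwise_cons.mp hL).1 y List.mem_cons_self
          have hpt : (y :: t').Pairwise (· ≤ ·) := (List.pairwise_cons.mp hL).2
          have hadj : pvAdj (x :: y :: t') = (if x = y then [x] else []) ++ pvAdj (y :: t') := by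
            by_cases h : x = y <;> simp [pvAdj, h]
          by_cases hk_eq : k = x
          · subst hk_eq
            by_cases h : k = y
            · have hky : k ∈ y :: t' := h ▸ List.mem_cons_self
              have hthis := ih hpt k hky
              rw [hadj]
              have hyk : y = k := h.symm
              subst hyk
              simp at hthis ⊢
              exact hthis
            · have hklt : k < y := lt_of_le_of_ne hxy h
              have hknot : k ∉ y :: t' := by
                intro hmem
                have : y ≤ k := by
                  rcases List.mem_cons.mp hmem with rfl | hmem'
                  · exact le_refl _
                  · exact (List.pairwise_cons.mp hpt).1 k hmem'
                exact absurd hklt (not_lt.mpr this)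
              have hcadj : (pvAdj (y :: t')).count k = 0 := by
                rw [List.count_eq_zero]
                intro hmem
                apply hknot
                obtain ⟨p, hp, hp1⟩ := List.mem_map.mp hmem
                have hpz := List.mem_of_mem_filter hp
                exact hp1 ▸ (List.of_mem_zip hpz).1
              have hct : (y :: t').count k = 0 := List.count_eq_zero.mpr hknot
              rw [hadj]
              have hyk : ¬ y = k := fun hh => h hh.symm
              simp [h, hcadj, hct]
          · have hkt : k ∈ y :: t' := by
              rcases List.mem_cons.mp hk with rfl | h'
              · exact absurd rfl hk_eq
              · exact h'
            have hthis := ih hpt k hkt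
            rw [hadj]
            have h1 : List.count k (if x = y then [x] else ([] : List String)) = 0 := by
              by_cases h : x = y
              · rw [if_pos h, List.count_eq_zero, List.mem_singleton]
                exact hk_eq
              · simp [h]
            have hxk : ¬ x = k := fun hh => hk_eq hh.symm
            simp only [List.count_append, List.count_cons, beq_iff_eq, h1, if_neg hxk] at hthis ⊢
            omega

-- A's dictionary after both loops, as an items list
theorem itemsA_eq (L : List String) (hL : L.Pairwise (· ≤ ·)) :
    ((PySem.List.pyRange 0 ((L.length : Int) - 1) 1).foldl
      (fun d i =>
        if PySem.List.pyGetD L i "" == PySem.List.pyGetD L (i + 1) "" then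
          d.modify (PySem.List.pyGetD L i "") 0 (· + 1)
        else d)
      (L.foldl (fun d i => d.insert i (1 : Int)) PySem.Dict.empty)).items =
    (PySem.List.dedup L).map (fun k => (k, (L.count k : Int))) := by
  by_cases hL0 : L = []
  · subst hL0; rfl
  have hlen1 : 1 ≤ L.length := List.length_pos_iff.mpr hL0
  have hPlen : (L.zip L.tail).length = L.length - 1 := by
    simp [List.length_zip, List.length_tail]
  have hPlenI : ((L.length : Int) - 1) = ((L.zip L.tail).length : Int) := by
    rw [hPlen]; omega
  set d1 := L.foldl (fun d i => d.insert i (1 : Int)) PySem.Dict.empty with hd1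
  rw [hPlenI]
  rw [PySem.List.foldl_congr_mem _ _
      (fun d j => (fun (d : PySem.Dict String Int) (p : String × String) =>
        if p.1 == p.2 then d.modify p.1 0 (· + 1) else d) d
          (PySem.List.pyGetD (L.zip L.tail) j ("", ""))) d1 ?hpoint]
  case hpoint =>
      intro acc i hi
      obtain ⟨h0, h1⟩ := PySem.List.mem_pyRange_one.mp hi
      have hiP : i.toNat < (L.zip L.tail).length := by omega
      have hiL : i.toNat < L.length := by omega
      have hiL1 : i.toNat + 1 < L.length := by omega
      have hzg : PySem.List.pyGetD (L.zip L.tail) i ("", "") = (L[i.toNat], L[i.toNat + 1]) := by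
        rw [PySem.List.pyGetD_eq_getElem _ _ h0 (by exact_mod_cast h1), List.getElem_zip,
          List.getElem_tail]
      have hg0 : PySem.List.pyGetD L i "" = L[i.toNat] :=
        PySem.List.pyGetD_eq_getElem _ _ h0 (by omega)
      have hg1 : PySem.List.pyGetD L (i + 1) "" = L[i.toNat + 1] := by
        have ht : (i + 1).toNat = i.toNat + 1 := by omega
        rw [PySem.List.pyGetD_eq_getElem _ _ (by omega) (by omega)]
        simp [ht]
      simp only [hzg, hg0, hg1]
  rw [PySem.List.foldl_pyRange_zero_pyGetD' (L.zip L.tail) ("", "")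
      (fun (d : PySem.Dict String Int) (p : String × String) =>
        if p.1 == p.2 then d.modify p.1 0 (· + 1) else d) d1]
  rw [foldl_if_filter (fun p => p.1 == p.2)
      (fun (d : PySem.Dict String Int) (p : String × String) => d.modify p.1 0 (· + 1))]
  have hmapfold :
      ((L.zip L.tail).filter (fun p => p.1 == p.2)).foldl
        (fun (d : PySem.Dict String Int) (p : String × String) => d.modify p.1 0 (· + 1)) d1 =
      (pvAdj L).foldl (fun (d : PySem.Dict String Int) (k : String) => d.modify k 0 (· + 1)) d1 := by
    rw [pvAdj, List.foldl_map]
  rw [hmapfold]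
  set d2 := (pvAdj L).foldl (fun (d : PySem.Dict String Int) (k : String) => d.modify k 0 (· + 1)) d1
    with hd2
  have hkeys1 : d1.keys = PySem.List.dedup L := by
    rw [hd1, PySem.Dict.keys_foldl_insert L (fun _ _ => (1 : Int)) PySem.Dict.empty,
      PySem.Dict.keys_empty, PySem.Set.update_nil_left, PySem.List.dedup_eq_ofList]
  have hkeys2 : d2.keys = PySem.List.dedup L := by
    rw [hd2, PySem.Dict.keys_foldl_modify (pvAdj L) 0 (fun _ _ v => v + 1) d1, hkeys1]
    apply update_of_subset
    intro x hx
    rw [PySem.List.mem_dedup]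
    obtain ⟨p, hp, hp1⟩ := List.mem_map.mp hx
    exact hp1 ▸ (List.of_mem_zip (List.mem_of_mem_filter hp)).1
  have hnodup : d2.keys.Nodup := by rw [hkeys2]; exact PySem.List.nodup_dedup L
  rw [PySem.Dict.items_eq_map_keys d2 hnodup 0, hkeys2]
  apply List.map_congr_left
  intro k hk
  have hkL : k ∈ L := (PySem.List.mem_dedup L k).mp hk
  have hgd : d2.getD k 0 = (L.count k : Int) := by
    rw [hd2, PySem.Dict.getD_foldl_modify_add_one (pvAdj L) d1 k, hd1,
      getD_foldl_insert_one L PySem.Dict.empty k, if_pos hkL, count_pvAdj L hL k hkL]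
    push_cast
    omega
  rw [hgd]

-- Python's set/dedup order of first letters, as a sublist of the original list
theorem foldl_add_sublist :
    ∀ (xs : List String) (s : PySem.Set String),
      ∃ t, xs.foldl PySem.Set.add s = s ++ t ∧ t.Sublist xs := by
  intro xs
  induction xs with
  | nil => intro s; exact ⟨[], by simp, List.nil_sublist _⟩
  | cons x t ih =>
      intro s
      by_cases hx : x ∈ s
      · obtain ⟨u, hu, hsub⟩ := ih s
        refine ⟨u, ?_, hsub.cons x⟩
        simpa [List.foldl_cons, PySem.Set.add_of_mem hx] using hu
      · obtain ⟨u, hu, hsub⟩ := ih (s ++ [x])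
        refine ⟨x :: u, ?_, hsub.cons₂ x⟩
        simp only [List.foldl_cons, PySem.Set.add_of_not_mem hx]
        simpa using hu

theorem dedup_sublist (L : List String) : (PySem.List.dedup L).Sublist L := by
  rw [PySem.List.dedup_eq_ofList, PySem.Set.ofList_eq_foldl]
  obtain ⟨t, h1, h2⟩ := foldl_add_sublist L []
  rw [h1]
  simpa using h2

theorem foldl_stepB_isSome {α : Type} (k1 : α → Int) (k2 : α → String) :
    ∀ (xs : List α) (a : α), ∃ m, xs.foldl (pvStepB k1 k2) (some a) = some m := by
  intro xs
  induction xs with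
  | nil => intro a; exact ⟨a, rfl⟩
  | cons x t ih =>
      intro a
      obtain ⟨b, hb⟩ : ∃ b, pvStepB k1 k2 (some a) x = some b := by
        simp only [pvStepB]; split <;> exact ⟨_, rfl⟩
      simpa [List.foldl_cons, hb] using ih b

theorem min2?_isSome {α : Type} (k1 : α → Int) (k2 : α → String) (x : α) (t : List α) :
    ∃ m, PySem.List.min2? (x :: t) k1 k2 = some m := by
  rw [min2?_eq_foldl_stepB]
  simpa [List.foldl_cons, pvStepB] using foldl_stepB_isSome k1 k2 t x

-- ===== VERDICT (by name: the statement is the Claim_ definition above) =====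
theorem rare_letter_spec : Claim_equal_rare_letter := by
  intro list_words _ hpre
  unfold Spec_rare_letter rare_letter rare_letter_alt
  simp only []
  set M := list_words.map (fun i => pvFirst i) with hM
  set L := PySem.List.sorted M (fun s => s) false with hLdef
  have hMne : M ≠ [] := by
    rw [hM]; simpa using hpre
  have hLne : L ≠ [] := by
    rw [hLdef]
    simpa [PySem.List.sorted_eq_nil_iff] using hMne
  have hLP : L.Pairwise (· ≤ ·) := PySem.List.sorted_pairwise M (fun s => s)
  have hperm : L.Perm M := PySem.List.sorted_perm M (fun s => s) false
  have hcnt : ∀ k, List.count k L = List.count k M := fun k => hperm.count_eq k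
  -- A's dictionary items
  have hitemsA :
      ((PySem.List.pyRange 0 ((L.length : Int) - 1) 1).foldl
        (fun d i =>
          if PySem.List.pyGetD L i "" == PySem.List.pyGetD L (i + 1) "" then
            d.modify (PySem.List.pyGetD L i "") 0 (· + 1)
          else d)
        (L.foldl (fun d i => d.insert i (1 : Int)) PySem.Dict.empty)).items =
      (PySem.List.dedup L).map (fun k => (k, (List.count k M : Int))) := by
    rw [itemsA_eq L hLP]
    exact List.map_congr_left (fun k _ => by rw [hcnt k])
  -- B's dictionary items
  have hB : list_words.foldl
      (fun d w => d.insert (pvFirst w) (d.getD (pvFirst w) 0 + (1 : Int))) PySem.Dict.empty =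
      PySem.Dict.counter M := by
    rw [← PySem.Dict.foldl_insert_getD_add_one_eq_counter M, hM, List.foldl_map]
  rw [hitemsA, hB, PySem.Dict.items_counter M]
  set gM := fun k => (k, (List.count k M : Int)) with hgM
  set KA := PySem.List.dedup L with hKA
  set KB := PySem.Set.ofList M with hKB
  -- key lists: same distinct letters
  have hKAnd : KA.Nodup := PySem.List.nodup_dedup L
  have hKBnd : KB.Nodup := PySem.Set.nodup_ofList M
  have hKperm : KA.Perm KB := by
    rw [List.perm_ext_iff_of_nodup hKAnd hKBnd]
    intro a
    rw [hKA, hKB, PySem.List.mem_dedup, PySem.Set.mem_ofList, hperm.mem_iff]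
  have hIperm : (KA.map gM).Perm (KB.map gM) := hKperm.map gM
  -- KA is strictly increasing, so the mapped items are strictly increasing in their first component
  have hKAlt : KA.Pairwise (· < ·) := by
    have h1 : KA.Pairwise (· ≤ ·) := List.Pairwise.sublist (dedup_sublist L) hLP
    have h2 : KA.Pairwise (· ≠ ·) := hKAnd
    exact (h1.and h2).imp (fun hab => lt_of_le_of_ne hab.1 hab.2)
  have hpairK2 : (KA.map gM).Pairwise (fun a b => a.1 < b.1) := by
    rw [List.pairwise_map]
    simpa [hgM] using hKAlt
  -- both sides compute the same lexicographic minimum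
  have hKAne : KA ≠ [] := by
    rw [hKA]
    intro h
    have := (PySem.List.mem_dedup L (L.head hLne)).mpr (List.head_mem hLne)
    rw [h] at this
    cases this
  obtain ⟨xA, tA, hKAcons⟩ := List.exists_cons_of_ne_nil hKAne
  obtain ⟨xB, tB, hKBcons⟩ := List.exists_cons_of_ne_nil (fun h => hKAne (List.Perm.eq_nil (h ▸ hKperm)))
  obtain ⟨mA, hmA⟩ : ∃ m, PySem.List.min2? (KA.map gM) (fun p => p.2) (fun p => p.1) = some m := by
    rw [hKAcons, List.map_cons]; exact min2?_isSome _ _ _ _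
  obtain ⟨mB, hmB⟩ : ∃ m, PySem.List.min2? (KB.map gM) (fun p => p.2) (fun p => p.1) = some m := by
    rw [hKBcons, List.map_cons]; exact min2?_isSome _ _ _ _
  have hhead : (PySem.List.sorted (KA.map gM) (fun p => p.2) false).head? = some mA := by
    rw [head?_sorted_eq_foldl_stepA,
      foldl_stepA_eq_stepB (fun p => p.2) (fun p => p.1) (KA.map gM) none hpairK2
        (by intro m hm; cases hm),
      ← min2?_eq_foldl_stepB, hmA]
  obtain ⟨tl, hSL⟩ := List.head?_eq_some_iff.mp hhead
  rw [hSL, hmB]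
  simp only [PySem.List.pyGet?, PySem.List.pyIdx?]
  norm_num
  -- the two minima have the same first component
  obtain ⟨hmemA, hminA⟩ := min2?_isMin (fun p => p.2) (fun p => p.1) (KA.map gM) mA hmA
  obtain ⟨hmemB, hminB⟩ := min2?_isMin (fun p => p.2) (fun p => p.1) (KB.map gM) mB hmB
  have hle1 : pvLexLE (fun p => p.2) (fun p => p.1) mA mB :=
    hminA mB (hIperm.symm.subset hmemB)
  have hle2 : pvLexLE (fun p => p.2) (fun p => p.1) mB mA :=
    hminB mA (hIperm.subset hmemA)
  rcases hle1 with h1 | ⟨h1e, h1s⟩ <;> rcases hle2 with h2 | ⟨h2e, h2s⟩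
  · exact absurd (lt_trans h1 h2) (lt_irrefl _)
  · exact absurd (h2e ▸ h1) (lt_irrefl _)
  · exact absurd (h1e ▸ h2) (lt_irrefl _)
  · exact le_antisymm h1s h2s
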